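-- pv_equiv track=rewrite | github.com/BMDroid/LIT2019 | bayes/bayes.py | text_parse
-- ===== SOURCE A (Python) =====
-- def text_parse(s):
--     ''' Take a string and parses out the text into a list of strings.
--     It eliminates anything under two char and conters them to lower case.
--     Args:
--         s::str
--             The input string.
--     Returns:
--         t::[str]
--             A list of strings parsing from the input string.
--     '''
--     import string
--     t = []
--     # table = str.maketrans(dict(zip(string.punctuation, [' ']*len(string.punctuation))))
--     # dictionary.fromkeys(sequence[, value])
--     # value is optional, here the value = ' '
--     # https://www.programiz.com/python-programming/methods/dictionary/fromkeys
--     table = str.maketrans(dict.fromkeys(string.punctuation, ' '))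
--     s = s.lower().translate(table)
--     t = s.split()
--     t = [word for word in t if len(word) > 2]
--     return t
-- ===== SOURCE B (Python) =====
-- import string
--
-- def text_parse(s):
--     '''Single fused pass: a character-level state machine that scans s once,
--     growing the current word char by char (lowercasing as it goes) and
--     emitting it at each separator only when it is longer than two chars.
--     No translation table, no split(), no separate filter pass.'''
--     words = []
--     cur = []
--     for ch in s:
--         if ch in string.punctuation or ch.isspace():
--             if len(cur) > 2:
--                 words.append(''.join(cur))
--             cur = []
--         else:
--             cur.append(ch.lower())
--     if len(cur) > 2:
--         words.append(''.join(cur))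
--     return words
-- ===== Notes on version B (the rewrite author's own statement) =====
-- stated objective: alternative
-- what changed: Replaces A's staged pipeline (build a translation table, lower+translate the whole string, split(), then a separate len>2 filter pass) with a single fused character-level state machine: one loop over s that grows the current word (lowercasing per char) and emits it at each separator only if longer than two chars.
import Mathlib
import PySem

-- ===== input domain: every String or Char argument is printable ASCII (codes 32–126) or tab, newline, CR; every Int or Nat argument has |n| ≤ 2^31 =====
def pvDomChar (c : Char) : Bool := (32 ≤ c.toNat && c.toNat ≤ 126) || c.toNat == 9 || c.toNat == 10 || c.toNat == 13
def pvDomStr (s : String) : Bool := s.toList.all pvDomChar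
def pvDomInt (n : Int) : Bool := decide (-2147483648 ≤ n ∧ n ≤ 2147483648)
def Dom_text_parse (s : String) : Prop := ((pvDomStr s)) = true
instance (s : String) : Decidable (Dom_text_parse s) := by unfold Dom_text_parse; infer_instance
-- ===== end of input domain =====

-- B replaces A's staged pipeline (translate table, lower+translate, split(), filter pass)
-- with one fused character-level state machine; objective: alternative.

-- Shared character class: membership in string.punctuation (ASCII 33-47, 58-64, 91-96, 123-126).
def pvIsPunct (c : Char) : Bool :=
  (33 ≤ c.toNat && c.toNat ≤ 47) || (58 ≤ c.toNat && c.toNat ≤ 64) ||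
  (91 ≤ c.toNat && c.toNat ≤ 96) || (123 ≤ c.toNat && c.toNat ≤ 126)

-- ===== PORT A =====
-- s.lower().translate(table): translate maps each punctuation char to ' '; then split(); then filter len>2.
def text_parse (s : String) : List String :=
  ((PySem.Chars.split₀
      ((PySem.Str.lower s).toList.map (fun c => if pvIsPunct c then ' ' else c))).filter
    (fun w => PySem.Chars.len w > 2)).map (fun w => String.mk w)

-- ===== PORT B =====
-- 'ch in string.punctuation or ch.isspace()' — the separator test on the ORIGINAL char
def pvSep (c : Char) : Bool := pvIsPunct c || PySem.Chars.isspace c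

-- loop body: at a separator, flush cur (emit only if len > 2); otherwise grow cur with ch.lower()
def pvStep (st : List String × List Char) (c : Char) : List String × List Char :=
  if pvSep c then
    (if st.2.length > 2 then st.1 ++ [String.mk st.2] else st.1, [])
  else (st.1, st.2 ++ [PySem.Chars.lowerChar c])

-- the trailing 'if len(cur) > 2: words.append(...)' after the loop
def pvFinish (st : List String × List Char) : List String :=
  if st.2.length > 2 then st.1 ++ [String.mk st.2] else st.1

def text_parse_alt (s : String) : List String :=
  pvFinish (s.toList.foldl pvStep ([], []))

-- ===== PRECONDITION & SPEC =====
def Spec_text_parse (s : String) (out : List String) : Prop := out = text_parse_alt s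
instance (s : String) (out : List String) : Decidable (Spec_text_parse s out) := by unfold Spec_text_parse; infer_instance

-- ===== CLAIM =====
def Claim_equal_text_parse : Prop := ∀ (s : String), Dom_text_parse s → Spec_text_parse s (text_parse s)

-- ===== LEMMAS AND PROOFS =====

-- emit step: the token is kept iff it is longer than two characters
def pvEmit (w : List Char) : List String := if w.length > 2 then [String.mk w] else []

-- B's loop, as a recursion over the input (proof-only reformulation of the fold)
def pvTok : List Char → List Char → List String
  | cur, [] => pvEmit cur
  | cur, c :: rest =>
      if pvSep c then pvEmit cur ++ pvTok [] rest
      else pvTok (cur ++ [PySem.Chars.lowerChar c]) rest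

-- A's tokenizer: maximal runs of non-separator characters (proof-only)
def pvRuns (cs : List Char) : List (List Char) :=
  match cs with
  | [] => []
  | c :: rest =>
      if pvSep c then pvRuns rest
      else (c :: rest.takeWhile (fun d => !pvSep d)) :: pvRuns (rest.dropWhile (fun d => !pvSep d))
termination_by cs.length
decreasing_by
  · simp
  · simpa using Nat.lt_succ_of_le (List.length_dropWhile_le (fun d => !pvSep d) rest)

-- pvRuns, filtered to the long tokens and packed into strings
def pvRunsF (zs : List Char) : List String :=
  ((pvRuns zs).filter (fun w => PySem.Chars.len w > 2)).map (fun w => String.mk w)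

-- translating a punctuation char to ' ' turns the separator class into the whitespace class
lemma isspace_translate (c : Char) :
    PySem.Chars.isspace (if pvIsPunct c then ' ' else c) = pvSep c := by
  by_cases h : pvIsPunct c = true
  · simp [h, pvSep]
    decide
  · have h' : pvIsPunct c = false := Bool.eq_false_iff.mpr h
    simp [h', pvSep]

lemma translate_of_not_sep (c : Char) (h : pvSep c = false) :
    (if pvIsPunct c then ' ' else c) = c := by
  simp [pvSep] at h
  simp [h.1]

-- lowercasing a char never moves it in or out of the separator class
lemma sep_lowerChar (c : Char) : pvSep (PySem.Chars.lowerChar c) = pvSep c := by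
  unfold PySem.Chars.lowerChar
  by_cases h : PySem.Chars.isupper c = true
  · have hc : 65 ≤ c.toNat ∧ c.toNat ≤ 90 := by
      simpa [PySem.Chars.isupper, Char.le_def] using h
    have hv : (Char.ofNat (c.toNat + 32)).toNat = c.toNat + 32 := by
      have : Nat.isValidChar (c.toNat + 32) := Or.inl (by omega)
      simp [Char.ofNat, this]
    obtain ⟨h1, h2⟩ := hc
    have l : pvSep (Char.ofNat (c.toNat + 32)) = false := by
      simp [pvSep, pvIsPunct, PySem.Chars.isspace, hv]; omega
    have r : pvSep c = false := by
      simp [pvSep, pvIsPunct, PySem.Chars.isspace]; omega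
    simp [h, l, r]
  · simp [h]

lemma sep_lower_pred :
    ((fun d => !pvSep d) ∘ PySem.Chars.lowerChar) = (fun d => !pvSep d) :=
  funext fun d => by simp [Function.comp, sep_lowerChar]

-- split()'s worker on the translated string computes the runs tokenizer
lemma split_go_runs (ys : List Char) : ∀ (cur : List Char) (acc : List (List Char)),
    PySem.Chars.split₀.go (ys.map (fun c => if pvIsPunct c then ' ' else c)) cur acc =
      acc.reverse ++
        (if cur = [] then pvRuns ys
         else (cur.reverse ++ ys.takeWhile (fun d => !pvSep d)) ::
              pvRuns (ys.dropWhile (fun d => !pvSep d))) := by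
  induction ys with
  | nil =>
      intro cur acc
      cases cur with
      | nil => simp [PySem.Chars.split₀.go, pvRuns]
      | cons c cs => simp [PySem.Chars.split₀.go, pvRuns]
  | cons c rest ih =>
      intro cur acc
      simp only [List.map_cons, PySem.Chars.split₀.go, isspace_translate]
      by_cases hs : pvSep c = true
      · rw [if_pos hs]
        cases cur with
        | nil =>
            simp only [List.isEmpty_nil, ih]
            simp [pvRuns, hs]
        | cons d ds =>
            simp only [List.isEmpty_cons, Bool.false_eq_true, if_false, ih]
            simp [pvRuns, hs]
      · rw [if_neg hs]
        have hs' : pvSep c = false := Bool.eq_false_iff.mpr hs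
        rw [translate_of_not_sep c hs', ih (c :: cur) acc]
        cases cur with
        | nil =>
            simp [pvRuns, hs']
        | cons d ds =>
            simp [hs']

lemma split_eq_runs (ys : List Char) :
    PySem.Chars.split₀ (ys.map (fun c => if pvIsPunct c then ' ' else c)) = pvRuns ys := by
  have := split_go_runs ys [] []
  simpa [PySem.Chars.split₀] using this

-- pvRuns drops a leading separator
lemma pvRuns_cons_sep (x : Char) (l : List Char) (h : pvSep x = true) :
    pvRuns (x :: l) = pvRuns l := by
  rw [pvRuns.eq_def]; simp [h]

-- filtering a run prepended to a run list = emitting it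
lemma runsF_cons (t : List Char) (r : List (List Char)) :
    ((t :: r).filter (fun w => PySem.Chars.len w > 2)).map (fun w => String.mk w) =
      pvEmit t ++ ((r.filter (fun w => PySem.Chars.len w > 2)).map (fun w => String.mk w)) := by
  by_cases h : t.length > 2 <;> simp [pvEmit, h]

-- one unfolding of pvRunsF on a lowered list, phrased over the original characters
lemma runs_unfold (zs : List Char) :
    pvRunsF (zs.map PySem.Chars.lowerChar) =
      pvEmit ((zs.takeWhile (fun d => !pvSep d)).map PySem.Chars.lowerChar) ++
        pvRunsF ((zs.dropWhile (fun d => !pvSep d)).map PySem.Chars.lowerChar) := by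
  cases zs with
  | nil => simp [pvRunsF, pvRuns, pvEmit]
  | cons c rest =>
      by_cases hs : pvSep c = true
      · have : pvSep (PySem.Chars.lowerChar c) = true := by rw [sep_lowerChar]; exact hs
        simp [hs, pvRunsF, pvRuns, this, pvEmit]
      · have hs' : pvSep c = false := Bool.eq_false_iff.mpr hs
        have hl : pvSep (PySem.Chars.lowerChar c) = false := by rw [sep_lowerChar]; exact hs'
        unfold pvRunsF
        rw [List.map_cons]
        rw [pvRuns.eq_def]
        simp only [hl, Bool.false_eq_true, if_false]
        rw [List.takeWhile_map, List.dropWhile_map, sep_lower_pred]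
        rw [runsF_cons]
        simp [hs']

-- the fold with trailing flush is the recursion pvTok
lemma fold_tok (xs : List Char) : ∀ (cur : List Char) (acc : List String),
    pvFinish (xs.foldl pvStep (acc, cur)) = acc ++ pvTok cur xs := by
  induction xs with
  | nil =>
      intro cur acc
      by_cases h : cur.length > 2 <;> simp [pvFinish, pvTok, pvEmit, h]
  | cons c rest ih =>
      intro cur acc
      simp only [List.foldl_cons]
      by_cases hs : pvSep c = true
      · have hstep : pvStep (acc, cur) c =
            (if cur.length > 2 then acc ++ [String.mk cur] else acc, []) := by
          simp [pvStep, hs]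
        rw [hstep, ih, pvTok]
        by_cases h2 : cur.length > 2 <;> simp [hs, h2, pvEmit]
      · have hs' : pvSep c = false := Bool.eq_false_iff.mpr hs
        have hstep : pvStep (acc, cur) c = (acc, cur ++ [PySem.Chars.lowerChar c]) := by
          simp [pvStep, hs']
        rw [hstep, ih, pvTok]
        simp [hs']

-- pvTok computes the filtered runs of the lowered remainder
lemma tok_runs (xs : List Char) : ∀ (cur : List Char),
    pvTok cur xs =
      pvEmit (cur ++ (xs.takeWhile (fun d => !pvSep d)).map PySem.Chars.lowerChar) ++
        pvRunsF ((xs.dropWhile (fun d => !pvSep d)).map PySem.Chars.lowerChar) := by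
  induction xs with
  | nil => intro cur; simp [pvTok, pvRunsF, pvRuns]
  | cons c rest ih =>
      intro cur
      by_cases hs : pvSep c = true
      · have hl : pvSep (PySem.Chars.lowerChar c) = true := by rw [sep_lowerChar]; exact hs
        rw [pvTok]
        simp only [hs, if_true, ih [], List.nil_append]
        rw [← runs_unfold rest]
        simp [hs, pvRunsF, pvRuns_cons_sep _ _ hl]
      · have hs' : pvSep c = false := Bool.eq_false_iff.mpr hs
        rw [pvTok]
        simp only [hs', Bool.false_eq_true, if_false, ih (cur ++ [PySem.Chars.lowerChar c])]
        simp [hs']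

-- ===== VERDICT =====
theorem text_parse_spec : Claim_equal_text_parse := by
  intro s _
  unfold Spec_text_parse text_parse text_parse_alt
  rw [split_eq_runs]
  have hB : pvFinish (s.toList.foldl pvStep ([], [])) = pvTok [] s.toList := by
    simpa using fold_tok s.toList [] []
  have hlow : (PySem.Str.lower s).toList = s.toList.map PySem.Chars.lowerChar := by
    simp [PySem.Chars.lower]
  rw [hB, tok_runs s.toList []]
  rw [hlow]
  have hF : ((pvRuns (s.toList.map PySem.Chars.lowerChar)).filter
      (fun w => PySem.Chars.len w > 2)).map (fun w => String.mk w) =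
      pvRunsF (s.toList.map PySem.Chars.lowerChar) := rfl
  rw [hF, runs_unfold s.toList]
  simp
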